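-- pv_equiv track=rewrite | github.com/jizhuoran/caffe-huawei-atlas-convertor | convertor/huawei/impl/assign.py | _core_bind_axis
-- ===== SOURCE A (Python) =====
-- def _get_target_core_num(first_axis_size):
--     max_core_num = 65535
--     cloud_core_num = 32
--
--     if first_axis_size % cloud_core_num == 0:
--         return cloud_core_num
--
--     if first_axis_size <= max_core_num:
--         return first_axis_size
--
--     target_core_num = 1
--     for i in reversed(list(range(1, max_core_num + 1))):
--         if first_axis_size % i == 0:
--             target_core_num = i
--             break
--
--     return target_core_num
--
-- def _core_bind_axis(input_shape):
--     cloud_core_num = 32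
--
--     def __suite_factor(pre_size, axis_size):
--         for index in reversed(range(2, axis_size + 1)):
--             if pre_size * index <= cloud_core_num and axis_size % index == 0:
--                 return axis_size // index
--         return 1
--
--     shape_len = len(input_shape)
--     cloud_core_num = 32
--     shape_size = 1
--     for i in range(shape_len):
--         if shape_size * input_shape[i] <= cloud_core_num:
--             shape_size *= input_shape[i]
--             continue
--
--         if i == 0:
--             return 0, _get_target_core_num(input_shape[0])
--
--         if shape_size * 2 > cloud_core_num:
--             return i-1, 1
--         else:
--             factor = __suite_factor(shape_size, input_shape[i])
--             if factor == 1: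
--                 return i-1, 1
--             else:
--                 return i, factor
--     return shape_len-1, 1
-- ===== SOURCE B (Python) =====
-- def _largest_div_le_65535(n):
--     # largest divisor of n not exceeding 65535, via divisor-pair enumeration up to sqrt(n)
--     best = 1
--     d = 1
--     while d * d <= n:
--         if n % d == 0:
--             if d <= 65535 and d > best:
--                 best = d
--             q = n // d
--             if q <= 65535 and q > best:
--                 best = q
--         d += 1
--     return best
--
-- def _target_core_num(first_axis_size):
--     if first_axis_size % 32 == 0:
--         return 32
--     if first_axis_size <= 65535:
--         return first_axis_size
--     return _largest_div_le_65535(first_axis_size)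
--
-- def _suite_factor(pre_size, axis_size):
--     if pre_size <= 0:
--         return 1
--     bound = min(axis_size, 32 // pre_size)
--     for index in range(bound, 1, -1):
--         if axis_size % index == 0:
--             return axis_size // index
--     return 1
--
-- def _core_bind_axis(input_shape):
--     core = 32
--     pre = 1
--     hit = None
--     for idx, a in enumerate(input_shape):
--         if pre * a > core:
--             hit = (idx, a)
--             break
--         pre *= a
--     if hit is None:
--         return len(input_shape) - 1, 1
--     i, a = hit
--     if i == 0:
--         return 0, _target_core_num(a)
--     if 2 * pre > core:
--         return i - 1, 1
--     factor = _suite_factor(pre, a)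
--     if factor == 1:
--         return i - 1, 1
--     return i, factor
-- ===== Notes on version B (the rewrite author's own statement) =====
-- stated objective: alternative
-- what changed: The suite-factor search scans only the countdown range bounded by min(axis_size, 32 // pre_size) instead of the whole axis, and the largest divisor <= 65535 of a big first axis is found by enumerating divisor pairs up to sqrt(n) instead of a 65535-step descending scan.
import Mathlib
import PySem

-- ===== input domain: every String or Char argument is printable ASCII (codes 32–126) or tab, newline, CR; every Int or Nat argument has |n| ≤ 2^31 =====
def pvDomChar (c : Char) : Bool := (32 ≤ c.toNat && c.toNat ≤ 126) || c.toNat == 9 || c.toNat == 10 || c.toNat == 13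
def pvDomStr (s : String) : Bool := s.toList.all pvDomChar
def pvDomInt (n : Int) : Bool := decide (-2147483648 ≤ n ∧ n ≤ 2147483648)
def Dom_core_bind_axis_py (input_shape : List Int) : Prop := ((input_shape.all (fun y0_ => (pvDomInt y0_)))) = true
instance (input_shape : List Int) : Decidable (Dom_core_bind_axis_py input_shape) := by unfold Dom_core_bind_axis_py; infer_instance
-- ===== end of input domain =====

-- B restructures A's two descending scans: the suite-factor scan runs only over the range bounded by
-- 32 // pre_size, and the largest divisor ≤ 65535 is taken from divisor pairs (d, n//d); same results.

-- ===== PORT A =====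
-- _get_target_core_num: the for/break over reversed(range(1, 65536)) is find? on the reversed range
def getTargetA (n : Int) : Int :=
  if PySem.Int.mod n 32 = 0 then 32
  else if n ≤ 65535 then n
  else (((PySem.List.pyRange 1 (65535 + 1) 1).reverse.find?
          (fun i => PySem.Int.mod n i == 0)).getD 1)

-- __suite_factor: for/return over reversed(range(2, axis_size + 1))
def suiteFactorA (pre axis : Int) : Int :=
  match (PySem.List.pyRange 2 (axis + 1) 1).reverse.find?
      (fun idx => decide (pre * idx ≤ 32) && (PySem.Int.mod axis idx == 0)) with
  | some idx => PySem.Int.floordiv axis idx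
  | none => 1

-- the main for-loop over range(shape_len); input_shape[i] is the head of the remaining list
-- (at i == 0 the head IS input_shape[0])
def loopA (shapeLen : Int) : List Int → Int → Int → Int × Int
  | [], _, _ => (shapeLen - 1, 1)
  | a :: rest, i, size =>
    if size * a ≤ 32 then loopA shapeLen rest (i + 1) (size * a)
    else if i = 0 then (0, getTargetA a)
    else if size * 2 > 32 then (i - 1, 1)
    else
      let f := suiteFactorA size a
      if f = 1 then (i - 1, 1) else (i, f)

def core_bind_axis_py (input_shape : List Int) : Int × Int :=
  loopA (input_shape.length : Int) input_shape 0 1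

-- ===== PORT B =====
-- while d*d <= n: collect the divisor pair (d, n//d); the '1 ≤ d' conjunct only makes termination provable
def divLoopB (n : Int) (d : Int) (best : Int) : Int :=
  if h : 1 ≤ d ∧ d * d ≤ n then
    divLoopB n (d + 1)
      (if PySem.Int.mod n d = 0 then
        (if PySem.Int.floordiv n d ≤ 65535 ∧
            (if d ≤ 65535 ∧ best < d then d else best) < PySem.Int.floordiv n d
         then PySem.Int.floordiv n d
         else (if d ≤ 65535 ∧ best < d then d else best))
       else best)
  else best
termination_by (n + 1 - d).toNat
decreasing_by
  have hd : d ≤ d * d := le_mul_of_one_le_left (by omega) h.1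
  omega

def getTargetB (n : Int) : Int :=
  if PySem.Int.mod n 32 = 0 then 32
  else if n ≤ 65535 then n
  else divLoopB n 1 1

-- _suite_factor of Source B: scan bounded by min(axis, 32 // pre), a countdown range
def suiteFactorB (pre axis : Int) : Int :=
  if pre ≤ 0 then 1
  else
    match (PySem.List.pyRange (min axis (PySem.Int.floordiv 32 pre)) 1 (-1)).find?
        (fun idx => PySem.Int.mod axis idx == 0) with
    | some idx => PySem.Int.floordiv axis idx
    | none => 1

-- the enumerate loop of Source B: first index whose prefix product overflows 32
def findViolB : List Int → Int → Int → Option (Int × Int × Int)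
  | [], _, _ => none
  | a :: rest, idx, pre =>
    if pre * a > 32 then some (idx, pre, a) else findViolB rest (idx + 1) (pre * a)

def core_bind_axis_py_alt (input_shape : List Int) : Int × Int :=
  match findViolB input_shape 0 1 with
  | none => ((input_shape.length : Int) - 1, 1)
  | some (i, pre, a) =>
    if i = 0 then (0, getTargetB a)
    else if 2 * pre > 32 then (i - 1, 1)
    else
      let f := suiteFactorB pre a
      if f = 1 then (i - 1, 1) else (i, f)

-- ===== PRECONDITION & SPEC =====
def Spec_core_bind_axis_py (input_shape : List Int) (out : Int × Int) : Prop := out = core_bind_axis_py_alt input_shape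
instance (input_shape : List Int) (out : Int × Int) : Decidable (Spec_core_bind_axis_py input_shape out) := by unfold Spec_core_bind_axis_py; infer_instance

-- ===== CLAIM (what is proved, stated in full; the proofs are below) =====
def Claim_equal_core_bind_axis_py : Prop := ∀ (input_shape : List Int), Dom_core_bind_axis_py input_shape → Spec_core_bind_axis_py input_shape (core_bind_axis_py input_shape)

-- ===== LEMMAS AND PROOFS =====

-- "r is the greatest divisor of n lying in [1, 65535]"
def GreatestDiv (n r : Int) : Prop :=
  r ∣ n ∧ 1 ≤ r ∧ r ≤ 65535 ∧ ∀ e, 1 ≤ e → e ≤ 65535 → e ∣ n → e ≤ r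

def GreatestDivUpTo (n hi r : Int) : Prop :=
  r ∣ n ∧ 1 ≤ r ∧ r ≤ hi ∧ ∀ e, 1 ≤ e → e ≤ hi → e ∣ n → e ≤ r

lemma greatestDiv_unique {n r s : Int} (hr : GreatestDiv n r) (hs : GreatestDiv n s) : r = s :=
  le_antisymm (hs.2.2.2 r hr.2.1 hr.2.2.1 hr.1) (hr.2.2.2 s hs.2.1 hs.2.2.1 hs.1)

-- find? on the countdown range [hi, …, 1] returns the greatest element satisfying p (or none)
lemma descWitness (p : Int → Bool) : ∀ (fuel : Nat) (hi : Int), hi.toNat ≤ fuel →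
    (match (PySem.List.pyRange hi 0 (-1)).find? p with
     | some r => p r = true ∧ 1 ≤ r ∧ r ≤ hi ∧ ∀ e, 1 ≤ e → e ≤ hi → p e = true → e ≤ r
     | none => ∀ e, 1 ≤ e → e ≤ hi → p e = false) := by
  intro fuel
  induction fuel with
  | zero =>
    intro hi hf
    rw [PySem.List.pyRange_neg_one_eq_nil (by omega : hi ≤ 0)]
    simp only [List.find?]
    exact fun e he1 he2 => absurd (he1.trans he2) (by omega)
  | succ k ih =>
    intro hi hf
    by_cases h0 : hi ≤ 0
    · rw [PySem.List.pyRange_neg_one_eq_nil h0]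
      simp only [List.find?]
      exact fun e he1 he2 => absurd (he1.trans he2) (by omega)
    · rw [PySem.List.pyRange_neg_one_cons (by omega : (0:Int) < hi)]
      by_cases hp : p hi = true
      · rw [List.find?_cons_of_pos (h := hp)]
        exact ⟨hp, by omega, le_refl _, fun e _ he2 _ => he2⟩
      · have hp' : p hi = false := by simpa using hp
        rw [List.find?_cons_of_neg (h := by simp [hp'])]
        have IH := ih (hi - 1) (by omega)
        cases hfind : (PySem.List.pyRange (hi - 1) 0 (-1)).find? p with
        | none =>
          rw [hfind] at IH
          intro e he1 he2
          by_cases he : e = hi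
          · exact he ▸ hp'
          · exact IH e he1 (by omega)
        | some r =>
          rw [hfind] at IH
          obtain ⟨h1, h2, h3, h4⟩ := IH
          refine ⟨h1, h2, by omega, fun e he1 he2 hpe => ?_⟩
          by_cases he : e = hi
          · exact absurd (he ▸ hpe) (by simp [hp'])
          · exact h4 e he1 (by omega) hpe

-- loop invariant for divLoopB: once every divisor pair with small part < d is accounted for in best,
-- the loop returns the greatest divisor ≤ 65535
lemma divLoop_gd (n : Int) (hn : 0 < n) : ∀ (fuel : Nat) (d best : Int),
    (n + 1 - d).toNat ≤ fuel → 1 ≤ d → 1 ≤ best → best ∣ n → best ≤ 65535 →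
    (∀ e, 1 ≤ e → e ≤ 65535 → e ∣ n → (e < d ∨ n < e * d) → e ≤ best) →
    GreatestDiv n (divLoopB n d best) := by
  intro fuel
  induction fuel with
  | zero =>
    intro d best hf hd hb1 hbd hb65 hcov
    rw [divLoopB]
    have hdn : ¬ (1 ≤ d ∧ d * d ≤ n) := by
      rintro ⟨hx1, hx2⟩
      have : d ≤ d * d := le_mul_of_one_le_left (by omega) hx1
      omega
    rw [dif_neg hdn]
    refine ⟨hbd, hb1, hb65, fun e he1 he65 hed => hcov e he1 he65 hed (Or.inl ?_)⟩
    have : e ≤ n := Int.le_of_dvd hn hed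
    omega
  | succ k ih =>
    intro d best hf hd hb1 hbd hb65 hcov
    rw [divLoopB]
    by_cases hcond : 1 ≤ d ∧ d * d ≤ n
    · obtain ⟨h1, h2⟩ := hcond
      rw [dif_pos ⟨h1, h2⟩]
      have hdn : d ≤ n := le_trans (le_mul_of_one_le_left (by omega) h1) h2
      set best1 := (if PySem.Int.mod n d = 0 then
          (if PySem.Int.floordiv n d ≤ 65535 ∧
              (if d ≤ 65535 ∧ best < d then d else best) < PySem.Int.floordiv n d
           then PySem.Int.floordiv n d
           else (if d ≤ 65535 ∧ best < d then d else best))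
         else best) with hbest1
      have fact0 : best ≤ best1 := by
        rw [hbest1]; split_ifs <;> omega
      have fact_dvd : best1 ∣ n ∧ 1 ≤ best1 ∧ best1 ≤ 65535 := by
        rw [hbest1]
        by_cases hm : PySem.Int.mod n d = 0
        · have hddvd : d ∣ n := (PySem.Int.mod_eq_zero_iff_dvd n d).mp hm
          have hqe : PySem.Int.floordiv n d = n / d := PySem.Int.floordiv_eq_ediv_of_pos (by omega)
          have hprod : d * (n / d) = n := Int.mul_ediv_cancel' hddvd
          have hqdvd : (n / d) ∣ n := ⟨d, by rw [mul_comm]; exact hprod.symm⟩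
          have hq1 : 1 ≤ n / d := by nlinarith
          rw [if_pos hm, hqe]
          split_ifs with hA hB hB <;> simp_all
        · rw [if_neg hm]; exact ⟨hbd, hb1, hb65⟩
      have fact_d : PySem.Int.mod n d = 0 → d ≤ 65535 → d ≤ best1 := by
        intro hm hd65
        rw [hbest1, if_pos hm]
        split_ifs <;> omega
      have fact_q : PySem.Int.mod n d = 0 → n / d ≤ 65535 → n / d ≤ best1 := by
        intro hm hq65
        have hqe : PySem.Int.floordiv n d = n / d := PySem.Int.floordiv_eq_ediv_of_pos (by omega)
        rw [hbest1, if_pos hm, hqe]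
        split_ifs <;> omega
      refine ih (d + 1) best1 (by omega) (by omega) fact_dvd.2.1 fact_dvd.1 fact_dvd.2.2 ?_
      intro e he1 he65 hed hcase
      obtain ⟨c, hc⟩ := hed
      rcases hcase with hlt | hbig
      · by_cases hed' : e < d
        · exact le_trans (hcov e he1 he65 ⟨c, hc⟩ (Or.inl hed')) fact0
        · -- e = d
          have heq : e = d := by omega
          have hm : PySem.Int.mod n d = 0 :=
            (PySem.Int.mod_eq_zero_iff_dvd n d).mpr (heq ▸ ⟨c, hc⟩)
          exact heq ▸ fact_d hm (heq ▸ he65)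
      · by_cases hsm : n < e * d
        · exact le_trans (hcov e he1 he65 ⟨c, hc⟩ (Or.inr hsm)) fact0
        · -- e * d ≤ n < e * (d + 1): n = e * d, so e = n / d
          have hcd : c = d := by nlinarith
          have hnd : n = d * e := by rw [hc, hcd]; ring
          have hm : PySem.Int.mod n d = 0 :=
            (PySem.Int.mod_eq_zero_iff_dvd n d).mpr ⟨e, hnd⟩
          have hnq : n / d = e := by
            rw [hnd, Int.mul_ediv_cancel_left e (by omega : d ≠ 0)]
          exact hnq ▸ fact_q hm (hnq ▸ he65)
    · rw [dif_neg hcond]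
      have hdd : n < d * d := by
        rcases not_and_or.mp hcond with h | h
        · omega
        · omega
      refine ⟨hbd, hb1, hb65, fun e he1 he65 hed => hcov e he1 he65 hed ?_⟩
      by_cases hlt : e < d
      · exact Or.inl hlt
      · right
        have : d * d ≤ e * d := mul_le_mul_of_nonneg_right (by omega) (by omega)
        omega

lemma descSome (n : Int) (hi : Int) (h1 : 1 ≤ hi) :
    ∃ r, (PySem.List.pyRange hi 0 (-1)).find? (fun i => PySem.Int.mod n i == 0) = some r ∧
      GreatestDivUpTo n hi r := by
  have H := descWitness (fun i => PySem.Int.mod n i == 0) hi.toNat hi (le_refl _)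
  cases hfind : (PySem.List.pyRange hi 0 (-1)).find? (fun i => PySem.Int.mod n i == 0) with
  | none =>
    rw [hfind] at H
    have hc := H 1 (le_refl 1) h1
    simp at hc
  | some r =>
    rw [hfind] at H
    obtain ⟨hp, hr1, hrhi, hmax⟩ := H
    exact ⟨r, rfl,
      (PySem.Int.mod_eq_zero_iff_dvd n r).mp (by simpa using hp), hr1, hrhi,
      fun e he1 hehi hed =>
        hmax e he1 hehi (by simp [(PySem.Int.mod_eq_zero_iff_dvd n e).mpr hed])⟩

lemma getTarget_eq (n : Int) : getTargetA n = getTargetB n := by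
  unfold getTargetA getTargetB
  by_cases hm : (32:Int) ∣ n
  · simp [hm]
  · have hm' : ¬ (PySem.Int.mod n 32 = 0) := by
      simpa [PySem.Int.mod_eq_zero_iff_dvd] using hm
    by_cases hle : n ≤ 65535
    · simp [hm, hle]
    · rw [if_neg hm', if_neg hm', if_neg hle, if_neg hle]
      have hn : (0:Int) < n := by omega
      have hrev : (PySem.List.pyRange 1 (65535 + 1) 1).reverse = PySem.List.pyRange 65535 0 (-1) := by
        rw [PySem.List.pyRange_neg_one_eq_reverse]
        norm_num
      rw [hrev]
      have HB : GreatestDiv n (divLoopB n 1 1) :=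
        divLoop_gd n hn n.toNat 1 1 (by omega) (le_refl 1) (le_refl 1) (one_dvd n) (by norm_num)
          (fun e he1 _ hed hc => by
            rcases hc with h | h
            · omega
            · rw [mul_one] at h
              have := Int.le_of_dvd hn hed
              omega)
      obtain ⟨r, hfind, hrd, hr1, hr65, hmax⟩ := descSome n 65535 (by norm_num)
      rw [hfind, Option.getD_some]
      exact greatestDiv_unique ⟨hrd, hr1, hr65, hmax⟩ HB

lemma descFind (pre axis : Int) (hpre : 0 < pre) : ∀ (fuel : Nat) (hi : Int), (hi - 1).toNat ≤ fuel →
    (PySem.List.pyRange hi 1 (-1)).find?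
        (fun idx => decide (pre * idx ≤ 32) && (PySem.Int.mod axis idx == 0))
      = (PySem.List.pyRange (min hi (PySem.Int.floordiv 32 pre)) 1 (-1)).find?
        (fun idx => PySem.Int.mod axis idx == 0) := by
  have hiff : ∀ idx : Int, (pre * idx ≤ 32) ↔ idx ≤ PySem.Int.floordiv 32 pre := by
    intro idx
    rw [PySem.Int.le_floordiv_iff_mul_le hpre, mul_comm]
  intro fuel
  induction fuel with
  | zero =>
    intro hi hf
    rw [PySem.List.pyRange_neg_one_eq_nil (by omega : hi ≤ 1),
      PySem.List.pyRange_neg_one_eq_nil (le_trans (min_le_left _ _) (by omega : hi ≤ 1))]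
    rfl
  | succ k ih =>
    intro hi hf
    by_cases h1 : hi ≤ 1
    · rw [PySem.List.pyRange_neg_one_eq_nil h1,
        PySem.List.pyRange_neg_one_eq_nil (le_trans (min_le_left _ _) h1)]
      rfl
    · have hlt : (1:Int) < hi := by omega
      by_cases hcase : hi ≤ PySem.Int.floordiv 32 pre
      · rw [min_eq_left hcase, PySem.List.pyRange_neg_one_cons hlt]
        have hple : pre * hi ≤ 32 := (hiff hi).mpr hcase
        cases hb : (PySem.Int.mod axis hi == 0) with
        | true =>
          rw [List.find?_cons_of_pos (h := by simp [hple, hb]),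
            List.find?_cons_of_pos (p := fun idx => PySem.Int.mod axis idx == 0) (h := hb)]
        | false =>
          rw [List.find?_cons_of_neg (h := by simp [hb]),
            List.find?_cons_of_neg (p := fun idx => PySem.Int.mod axis idx == 0) (h := by simp [hb]),
            ih (hi - 1) (by omega), min_eq_left (by omega : hi - 1 ≤ PySem.Int.floordiv 32 pre)]
      · have hnot : ¬ (pre * hi ≤ 32) := fun hle => hcase ((hiff hi).mp hle)
        rw [PySem.List.pyRange_neg_one_cons hlt,
          List.find?_cons_of_neg (h := by simp [hnot]),
          ih (hi - 1) (by omega),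
          min_eq_right (by omega : PySem.Int.floordiv 32 pre ≤ hi - 1),
          min_eq_right (by omega : PySem.Int.floordiv 32 pre ≤ hi)]

lemma suite_eq (pre axis : Int) : suiteFactorA pre axis = suiteFactorB pre axis := by
  unfold suiteFactorA suiteFactorB
  have hrev : (PySem.List.pyRange 2 (axis + 1) 1).reverse = PySem.List.pyRange axis 1 (-1) := by
    rw [PySem.List.pyRange_neg_one_eq_reverse]
    norm_num
  rw [hrev]
  by_cases hpre : pre ≤ 0
  · rw [if_pos hpre]
    by_cases hax : axis ≤ 1
    · rw [PySem.List.pyRange_neg_one_eq_nil hax]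
      rfl
    · rw [PySem.List.pyRange_neg_one_cons (by omega : (1:Int) < axis)]
      have hnp : pre * axis ≤ 32 :=
        le_trans (mul_nonpos_of_nonpos_of_nonneg hpre (by omega)) (by norm_num)
      have hmod : PySem.Int.mod axis axis = 0 := (PySem.Int.mod_eq_zero_iff_dvd _ _).mpr dvd_rfl
      rw [List.find?_cons_of_pos (h := by simp [hnp, hmod])]
      show PySem.Int.floordiv axis axis = 1
      rw [PySem.Int.floordiv_eq_ediv_of_pos (by omega)]
      exact Int.ediv_self (by omega)
  · rw [if_neg hpre, descFind pre axis (by omega) (axis - 1).toNat axis (le_refl _)]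

lemma loop_eq (shapeLen : Int) : ∀ (l : List Int) (i size : Int),
    loopA shapeLen l i size =
      (match findViolB l i size with
       | none => (shapeLen - 1, 1)
       | some (j, pre, a) =>
         if j = 0 then (0, getTargetB a)
         else if 2 * pre > 32 then (j - 1, 1)
         else
           let f := suiteFactorB pre a
           if f = 1 then (j - 1, 1) else (j, f)) := by
  intro l
  induction l with
  | nil => intro i size; simp [loopA, findViolB]
  | cons a rest ih =>
    intro i size
    by_cases hle : size * a ≤ 32
    · have : ¬ (size * a > 32) := by omega
      simp only [loopA, findViolB, if_pos hle, if_neg this]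
      exact ih (i + 1) (size * a)
    · have hgt : size * a > 32 := by omega
      simp only [loopA, findViolB, if_neg hle, if_pos hgt]
      by_cases hi0 : i = 0
      · simp [hi0, getTarget_eq]
      · have h2 : (size * 2 > 32) ↔ (2 * size > 32) := by omega
        simp only [if_neg hi0, suite_eq, gt_iff_lt]
        by_cases hs : (32 : Int) < size * 2
        · simp only [if_pos hs, if_pos (show (32:Int) < 2 * size by omega)]
        · simp only [if_neg hs, if_neg (show ¬ ((32:Int) < 2 * size) by omega)]

-- ===== VERDICT (by name: the statement is the Claim_ definition above) =====
theorem core_bind_axis_py_spec : Claim_equal_core_bind_axis_py := by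
  intro shape _
  unfold Spec_core_bind_axis_py core_bind_axis_py core_bind_axis_py_alt
  exact loop_eq (shape.length : Int) shape 0 1
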